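-- pv_equiv track=rewrite | github.com/stefania1570/Python-Programming | Laboratorul 2/laboratorul2.py | find_obstructed_seats
-- ===== SOURCE A (Python) =====
-- def find_obstructed_seats(matrix):
--     obstructed_seats = []
--
--     rows = len(matrix)
--     cols = len(matrix[0])
--
--     #citim matricea pe coloane
--     for col in range(cols):
--             for row in range(rows):
--                 for k in range(row):
--                     if matrix[row][col] <= matrix[k][col]:
--                         obstructed_seats.append((row, col))
--                         break
--     return obstructed_seats
-- ===== SOURCE B (Python) =====
-- def find_obstructed_seats(matrix):
--     obstructed_seats = []
--     n = len(matrix)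
--     cols = len(matrix[0])
--     for col in range(cols):
--         best = matrix[0][col]
--         for row in range(1, n):
--             v = matrix[row][col]
--             if v <= best:
--                 obstructed_seats.append((row, col))
--             else:
--                 best = v
--     return obstructed_seats
-- ===== Notes on version B (the rewrite author's own statement) =====
-- stated objective: faster
-- what changed: Replaced the inner scan over all earlier rows of the column by a running per-column prefix maximum, comparing each seat to it once.
import Mathlib
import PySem

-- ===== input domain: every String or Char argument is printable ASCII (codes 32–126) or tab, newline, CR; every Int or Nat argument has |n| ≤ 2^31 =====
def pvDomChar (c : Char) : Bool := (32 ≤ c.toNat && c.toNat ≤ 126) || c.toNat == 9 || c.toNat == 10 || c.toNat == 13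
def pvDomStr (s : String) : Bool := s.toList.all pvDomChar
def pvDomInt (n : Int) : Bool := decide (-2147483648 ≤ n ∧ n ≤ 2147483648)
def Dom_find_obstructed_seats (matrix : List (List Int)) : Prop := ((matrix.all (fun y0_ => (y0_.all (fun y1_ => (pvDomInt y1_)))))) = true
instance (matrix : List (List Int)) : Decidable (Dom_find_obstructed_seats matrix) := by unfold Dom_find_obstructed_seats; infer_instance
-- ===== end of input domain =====

-- B replaces A's inner scan over all earlier rows of a column by a running per-column
-- prefix maximum (faster: O(rows*cols) instead of O(rows^2*cols) comparisons).

-- matrix[r][c] for the in-range nonnegative indices both loops produce (exact there)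
def pvGet (m : List (List Int)) (r c : Nat) : Int := (m.getD r []).getD c 0

-- ===== PORT A =====
-- 'for k in range(row): if matrix[row][col] <= matrix[k][col]: append; break'
def pvKloop (m : List (List Int)) (row col : Nat) : List Nat → Bool
  | [] => false
  | k :: rest => if pvGet m row col ≤ pvGet m k col then true else pvKloop m row col rest

def find_obstructed_seats (matrix : List (List Int)) : List (Int × Int) :=
  let rows := matrix.length
  let cols := (matrix.headD []).length
  (List.range cols).foldl (fun acc col =>
    (List.range rows).foldl (fun acc2 row =>
      if pvKloop matrix row col (List.range row) then acc2 ++ [((row : Int), (col : Int))]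
      else acc2) acc) []

-- ===== PORT B =====
-- one step of B's inner loop: compare to the running maximum, append or update it
def pvColStep (m : List (List Int)) (col : Nat) (st : Int × List (Int × Int)) (row : Nat) :
    Int × List (Int × Int) :=
  let v := pvGet m row col
  if v ≤ st.1 then (st.1, st.2 ++ [((row : Int), (col : Int))]) else (v, st.2)

def find_obstructed_seats_alt (matrix : List (List Int)) : List (Int × Int) :=
  let n := matrix.length
  let cols := (matrix.headD []).length
  (List.range cols).foldl (fun acc col =>
    ((List.range' 1 (n - 1)).foldl (pvColStep matrix col) (pvGet matrix 0 col, acc)).2) []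

-- ===== PRECONDITION & SPEC =====
-- Pre_ excludes exactly the inputs where the Python raises IndexError: the empty matrix
-- (matrix[0]) and, when there is more than one row, matrices with a row shorter than the
-- first row (matrix[row][col] for col up to len(matrix[0])-1); B raises there too.
def Pre_find_obstructed_seats (matrix : List (List Int)) : Prop :=
  matrix ≠ [] ∧ (matrix.length ≤ 1 ∨ ∀ r ∈ matrix, (matrix.headD []).length ≤ r.length)
instance (matrix : List (List Int)) : Decidable (Pre_find_obstructed_seats matrix) := by
  unfold Pre_find_obstructed_seats; infer_instance

def pvWitness_find_obstructed_seats : List (List Int) := [[1, 2], [2, 1]]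

def Spec_find_obstructed_seats (matrix : List (List Int)) (out : List (Int × Int)) : Prop := out = find_obstructed_seats_alt matrix
instance (matrix : List (List Int)) (out : List (Int × Int)) : Decidable (Spec_find_obstructed_seats matrix out) := by unfold Spec_find_obstructed_seats; infer_instance

-- ===== CLAIM (what is proved, stated in full; the proofs are below) =====
def Claim_equal_find_obstructed_seats : Prop := ∀ (matrix : List (List Int)), Dom_find_obstructed_seats matrix → Pre_find_obstructed_seats matrix → Spec_find_obstructed_seats matrix (find_obstructed_seats matrix)

-- ===== LEMMAS AND PROOFS =====

-- A's break-loop is an 'any' over the earlier rows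
theorem pvKloop_eq_any (m : List (List Int)) (row col : Nat) (ks : List Nat) :
    pvKloop m row col ks = ks.any (fun k => pvGet m row col ≤ pvGet m k col) := by
  induction ks with
  | nil => rfl
  | cons k rest ih =>
    simp only [pvKloop, List.any_cons]
    split_ifs with h <;> simp [h, ih]

-- the running maximum B maintains
def pvPMax (m : List (List Int)) (col : Nat) : Nat → Int
  | 0 => pvGet m 0 col
  | j + 1 => if pvGet m (j + 1) col ≤ pvPMax m col j then pvPMax m col j else pvGet m (j + 1) col

theorem le_pvPMax (m : List (List Int)) (col : Nat) :
    ∀ j k, k ≤ j → pvGet m k col ≤ pvPMax m col j := by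
  intro j
  induction j with
  | zero => intro k hk; interval_cases k; simp [pvPMax]
  | succ j ih =>
    intro k hk
    rcases Nat.lt_or_ge k (j + 1) with h | h
    · have := ih k (Nat.lt_succ_iff.mp h)
      simp only [pvPMax]; split_ifs with hc <;> omega
    · have : k = j + 1 := by omega
      subst this
      simp only [pvPMax]; split_ifs with hc <;> omega

theorem pvPMax_mem (m : List (List Int)) (col : Nat) :
    ∀ j, ∃ k, k ≤ j ∧ pvPMax m col j = pvGet m k col := by
  intro j
  induction j with
  | zero => exact ⟨0, le_rfl, rfl⟩
  | succ j ih =>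
    rcases ih with ⟨k, hk, hEq⟩
    simp only [pvPMax]
    split_ifs with hc
    · exact ⟨k, Nat.le_succ_of_le hk, hEq⟩
    · exact ⟨j + 1, le_rfl, rfl⟩

-- A's membership test at row j+1 is exactly a comparison with the prefix maximum
theorem any_iff_pmax (m : List (List Int)) (col j : Nat) :
    ((List.range (j + 1)).any (fun k => pvGet m (j + 1) col ≤ pvGet m k col)) =
      (pvGet m (j + 1) col ≤ pvPMax m col j : Bool) := by
  rw [Bool.eq_iff_iff]
  simp only [List.any_eq_true, List.mem_range, decide_eq_true_eq]
  constructor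
  · rintro ⟨k, hk, hle⟩
    exact le_trans hle (le_pvPMax m col j k (Nat.lt_succ_iff.mp hk))
  · intro h
    rcases pvPMax_mem m col j with ⟨k, hk, hEq⟩
    exact ⟨k, by omega, hEq ▸ h⟩

-- generic fold-with-append-if as filterMap
theorem foldl_if_filterMap {α β : Type} (p : α → Bool) (g : α → β) :
    ∀ (l : List α) (acc : List β),
      l.foldl (fun a x => if p x then a ++ [g x] else a) acc =
        acc ++ l.filterMap (fun x => if p x then some (g x) else none) := by
  intro l
  induction l with
  | nil => intro acc; simp
  | cons x xs ih =>
    intro acc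
    simp only [List.foldl_cons, List.filterMap_cons]
    split_ifs with h <;> simp [h, ih]

-- B's inner fold: the state is (prefix maximum, acc ++ the appended seats)
theorem bCol_fold (m : List (List Int)) (col : Nat) :
    ∀ (n : Nat) (acc : List (Int × Int)),
      (List.range' 1 n).foldl (pvColStep m col) (pvGet m 0 col, acc) =
        (pvPMax m col n,
         acc ++ (List.range' 1 n).filterMap (fun row =>
           if pvGet m row col ≤ pvPMax m col (row - 1) then some ((row : Int), (col : Int))
           else none)) := by
  intro n
  induction n with
  | zero => intro acc; simp [pvPMax]
  | succ n ih =>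
    intro acc
    rw [List.range'_1_concat, List.foldl_append, ih, List.filterMap_append]
    simp only [List.foldl_cons, List.foldl_nil, List.filterMap_cons, List.filterMap_nil]
    have h1 : 1 + n - 1 = n := by omega
    have h2 : (1 + n) = (n + 1) := by omega
    simp only [pvColStep, h2, Nat.add_sub_cancel]
    split_ifs with h <;> simp [pvPMax, h]

-- one column of A equals one column of B, for any accumulator
theorem col_eq (m : List (List Int)) (col : Nat) (acc : List (Int × Int)) :
    (List.range m.length).foldl (fun acc2 row =>
        if pvKloop m row col (List.range row) then acc2 ++ [((row : Int), (col : Int))]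
        else acc2) acc =
      ((List.range' 1 (m.length - 1)).foldl (pvColStep m col) (pvGet m 0 col, acc)).2 := by
  rw [bCol_fold]
  simp only
  have hstep : ∀ acc2 row,
      (if pvKloop m row col (List.range row) then acc2 ++ [((row : Int), (col : Int))] else acc2)
        = (if (List.range row).any (fun k => pvGet m row col ≤ pvGet m k col) then
            acc2 ++ [((row : Int), (col : Int))] else acc2) := by
    intro acc2 row; rw [pvKloop_eq_any]
  simp only [hstep]
  rw [foldl_if_filterMap]
  congr 1
  cases m with
  | nil => simp
  | cons r0 rest =>
    have hlen : (r0 :: rest).length = rest.length + 1 := by simp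
    rw [hlen]
    rw [List.range_succ_eq_map]  -- range (n+1) = 0 :: (range n).map (·+1)
    simp only [List.filterMap_cons, List.range_zero, List.any_nil]
    simp only [Nat.add_sub_cancel]
    rw [List.filterMap_map]
    have hr' : List.range' 1 rest.length = (List.range rest.length).map (· + 1) := by
      rw [List.range'_eq_map_range]; simp [Nat.add_comm]
    rw [hr', List.filterMap_map]
    apply List.filterMap_congr
    intro j _
    simp only [Function.comp]
    rw [any_iff_pmax]
    simp

-- ===== VERDICT (by name: the statement is the Claim_ definition above) =====
theorem find_obstructed_seats_spec : Claim_equal_find_obstructed_seats := by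
  intro matrix _ _
  unfold Spec_find_obstructed_seats find_obstructed_seats find_obstructed_seats_alt
  simp only
  induction List.range (matrix.headD []).length using List.reverseRecOn with
  | nil => rfl
  | append_singleton cs c ih =>
    rw [List.foldl_append, List.foldl_append, ih]
    simp only [List.foldl_cons, List.foldl_nil]
    exact col_eq matrix c _
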